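-- pv_equiv track=rewrite | github.com/hwmaltby/project-euler | problem_61.py | nums_1000_to_10000
-- ===== SOURCE A (Python) =====
-- def nums_1000_to_10000(a0, a1, a2):
--     n, nums = a0, []
--     while n < 10000:
--         if n >= 1000:
--             nums.append(n)
--         n += a1
--         a1 += a2
--     return nums
-- ===== SOURCE B (Python) =====
-- def nums_1000_to_10000(a0, a1, a2):
--     # Closed-form term of the sequence: f(k) = a0 + k*a1 + a2*(0+1+...+(k-1) scaled) .
--     def f(k):
--         return a0 + k * a1 + a2 * (k * (k - 1) // 2)
--
--     def first_ge_1000(lo, hi):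
--         # first j in [lo, hi] with f(j) >= 1000 (f nondecreasing there); hi if none
--         while lo < hi:
--             mid = (lo + hi) // 2
--             if f(mid) >= 1000:
--                 hi = mid
--             else:
--                 lo = mid + 1
--         return lo
--
--     nums = []
--     k = 0
--     while True:
--         t = f(k)
--         if t >= 10000:
--             break
--         if t >= 1000:
--             nums.append(t)
--             k += 1
--         elif a2 > 0:
--             lo = max(k + 1, -(a1 // a2))            # first index with nonnegative step
--             k = first_ge_1000(lo, lo + 2 * (1000 - f(lo)) + 2)
--         elif a2 < 0:
--             peak = max(0, (a1 - 1) // (-a2) + 1)    # index of the sequence's maximum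
--             k = first_ge_1000(k + 1, peak) if k < peak else k + 1
--         elif a1 > 0:
--             k = first_ge_1000(k + 1, k + 1 + (1000 - t))
--         else:
--             k += 1                                   # sequence never rises again
--     return nums
-- ===== Notes on version B (the rewrite author's own statement) =====
-- stated objective: alternative
-- what changed: B evaluates the k-th term by the closed form a0 + k*a1 + a2*(k*(k-1)//2) and, instead of stepping one index at a time like A's running n/a1 accumulators, jumps over each below-1000 stretch by binary-searching the monotone branch of the convex/concave term sequence for the next index with term >= 1000.
import Mathlib
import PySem

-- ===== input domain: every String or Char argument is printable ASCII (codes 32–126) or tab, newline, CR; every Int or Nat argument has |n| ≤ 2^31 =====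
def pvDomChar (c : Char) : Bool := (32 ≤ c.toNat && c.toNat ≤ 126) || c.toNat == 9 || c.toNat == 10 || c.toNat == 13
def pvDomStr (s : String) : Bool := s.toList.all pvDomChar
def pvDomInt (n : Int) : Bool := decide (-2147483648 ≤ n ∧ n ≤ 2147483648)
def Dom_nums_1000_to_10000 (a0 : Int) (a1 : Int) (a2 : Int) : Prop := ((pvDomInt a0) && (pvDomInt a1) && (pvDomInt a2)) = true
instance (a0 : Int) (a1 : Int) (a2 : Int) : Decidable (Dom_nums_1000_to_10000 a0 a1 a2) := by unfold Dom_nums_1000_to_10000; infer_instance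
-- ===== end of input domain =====

-- B jumps over the stretches where the quadratic-sequence term is below 1000, locating the next
-- in-window index by binary search on the closed form a0 + k*a1 + a2*(k*(k-1)//2), instead of A's
-- one-step-at-a-time accumulator loop.


-- ===== PORT A =====
-- A's unbounded `while n < 10000` loop; the fuel parameter only totalises it in Lean
-- (both ports consume fuel identically, one unit per index, so equality holds at any shared fuel).
def numsLoopA (fuel : Nat) (n : Int) (a1 : Int) (a2 : Int) (nums : List Int) : List Int :=
  match fuel with
  | 0 => nums
  | f + 1 =>
    if n < 10000 then
      numsLoopA f (n + a1) (a1 + a2) a2 (if 1000 ≤ n then nums ++ [n] else nums)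
    else nums

def nums_1000_to_10000 (a0 : Int) (a1 : Int) (a2 : Int) : List Int :=
  numsLoopA (2 ^ 63) a0 a1 a2 []

-- ===== PORT B =====
-- f(k) of Source B: the closed-form k-th term.
def fB (a0 : Int) (a1 : Int) (a2 : Int) (k : Int) : Int :=
  a0 + k * a1 + a2 * PySem.Int.floordiv (k * (k - 1)) 2

-- first_ge_1000 of Source B: binary search for the first j in [lo, hi] with f(j) >= 1000
-- (fuel only totalises the while-loop; the interval halves each step).
def firstGe1000 (fuel : Nat) (a0 : Int) (a1 : Int) (a2 : Int) (lo : Int) (hi : Int) : Int :=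
  match fuel with
  | 0 => lo
  | fu + 1 =>
    if lo < hi then
      if 1000 ≤ fB a0 a1 a2 (PySem.Int.floordiv (lo + hi) 2) then
        firstGe1000 fu a0 a1 a2 lo (PySem.Int.floordiv (lo + hi) 2)
      else firstGe1000 fu a0 a1 a2 (PySem.Int.floordiv (lo + hi) 2 + 1) hi
    else lo

-- the jump computation of Source B's three closed-form branches (inlined in its while-loop body)
def jumpB (a0 : Int) (a1 : Int) (a2 : Int) (k : Int) : Int :=
  if 0 < a2 then
    firstGe1000 (2 ^ 63) a0 a1 a2 (max (k + 1) (-(PySem.Int.floordiv a1 a2)))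
      (max (k + 1) (-(PySem.Int.floordiv a1 a2))
        + 2 * (1000 - fB a0 a1 a2 (max (k + 1) (-(PySem.Int.floordiv a1 a2)))) + 2)
  else if a2 < 0 then
    if k < max 0 (PySem.Int.floordiv (a1 - 1) (-a2) + 1) then
      firstGe1000 (2 ^ 63) a0 a1 a2 (k + 1) (max 0 (PySem.Int.floordiv (a1 - 1) (-a2) + 1))
    else k + 1
  else if 0 < a1 then
    firstGe1000 (2 ^ 63) a0 a1 a2 (k + 1) (k + 1 + (1000 - fB a0 a1 a2 k))
  else k + 1

-- Source B's outer while-loop. Fuel bookkeeping only (Source B has none): `fuel` counts A-style single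
-- index steps (a jump of width d consumes d fuel), and `dep` is a structural recursion depth
-- bound kept ≥ fuel.
def numsLoopBGo (dep : Nat) (fuel : Nat) (a0 : Int) (a1 : Int) (a2 : Int) (k : Int) (nums : List Int) : List Int :=
  match dep with
  | 0 => nums
  | dp + 1 =>
    match fuel with
    | 0 => nums
    | fu + 1 =>
      if 10000 ≤ fB a0 a1 a2 k then nums
      else if 1000 ≤ fB a0 a1 a2 k then
        numsLoopBGo dp fu a0 a1 a2 (k + 1) (nums ++ [fB a0 a1 a2 k])
      else numsLoopBGo dp (fu + 1 - (jumpB a0 a1 a2 k - k).toNat) a0 a1 a2 (jumpB a0 a1 a2 k) nums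

def nums_1000_to_10000_alt (a0 : Int) (a1 : Int) (a2 : Int) : List Int :=
  numsLoopBGo (2 ^ 63) (2 ^ 63) a0 a1 a2 0 []

-- ===== PRECONDITION & SPEC =====
def Spec_nums_1000_to_10000 (a0 : Int) (a1 : Int) (a2 : Int) (out : List Int) : Prop := out = nums_1000_to_10000_alt a0 a1 a2
instance (a0 : Int) (a1 : Int) (a2 : Int) (out : List Int) : Decidable (Spec_nums_1000_to_10000 a0 a1 a2 out) := by unfold Spec_nums_1000_to_10000; infer_instance

-- ===== CLAIM (what is proved, stated in full; the proofs are below) =====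
def Claim_equal_nums_1000_to_10000 : Prop := ∀ (a0 : Int) (a1 : Int) (a2 : Int), Dom_nums_1000_to_10000 a0 a1 a2 → Spec_nums_1000_to_10000 a0 a1 a2 (nums_1000_to_10000 a0 a1 a2)

-- ===== LEMMAS AND PROOFS =====

-- k*(k-1)//2 steps by k when k is incremented.
lemma tri_succ (k : Int) : PySem.Int.floordiv ((k + 1) * k) 2 = PySem.Int.floordiv (k * (k - 1)) 2 + k := by
  obtain ⟨m, hm⟩ := Int.even_mul_succ_self (k - 1)
  have h1 : k * (k - 1) = 2 * m := by linear_combination hm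
  have h2 : (k + 1) * k = 2 * (m + k) := by linear_combination hm
  rw [h1, h2, PySem.Int.floordiv_eq_ediv_of_pos (by norm_num),
      PySem.Int.floordiv_eq_ediv_of_pos (by norm_num),
      Int.mul_ediv_cancel_left _ (by norm_num), Int.mul_ediv_cancel_left _ (by norm_num)]

lemma fB_succ (a0 a1 a2 k : Int) : fB a0 a1 a2 (k + 1) = fB a0 a1 a2 k + (a1 + a2 * k) := by
  unfold fB
  rw [show (k + 1) * ((k + 1) - 1) = (k + 1) * k by ring, tri_succ]
  ring

-- nonnegative steps on [L, H) make fB nondecreasing on [L, H]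
lemma fB_mono (a0 a1 a2 L H : Int) (hs : ∀ i, L ≤ i → i < H → 0 ≤ a1 + a2 * i) :
    ∀ i j, L ≤ i → i ≤ j → j ≤ H → fB a0 a1 a2 i ≤ fB a0 a1 a2 j := by
  have key : ∀ n : Nat, ∀ i, L ≤ i → i + n ≤ H → fB a0 a1 a2 i ≤ fB a0 a1 a2 (i + n) := by
    intro n
    induction n with
    | zero => intro i _ _; simp
    | succ m ih =>
      intro i hLi hH
      have h1 : fB a0 a1 a2 i ≤ fB a0 a1 a2 (i + m) := ih i hLi (by push_cast at hH ⊢; omega)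
      have h2 : fB a0 a1 a2 (i + m + 1) = fB a0 a1 a2 (i + m) + (a1 + a2 * (i + m)) := fB_succ _ _ _ _
      have h3 : 0 ≤ a1 + a2 * (i + m) := hs _ (by omega) (by push_cast at hH ⊢; omega)
      have : (i + (m + 1 : Nat)) = (i + m + 1) := by push_cast; ring
      rw [this]; omega
  intro i j hLi hij hjH
  have := key (j - i).toNat i hLi (by omega)
  have hji : i + ((j - i).toNat : Int) = j := by omega
  rwa [hji] at this

-- nonpositive steps on [L, H) make fB nonincreasing on [L, H]
lemma fB_anti (a0 a1 a2 L H : Int) (hs : ∀ i, L ≤ i → i < H → a1 + a2 * i ≤ 0) :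
    ∀ i j, L ≤ i → i ≤ j → j ≤ H → fB a0 a1 a2 j ≤ fB a0 a1 a2 i := by
  have key : ∀ n : Nat, ∀ i, L ≤ i → i + n ≤ H → fB a0 a1 a2 (i + n) ≤ fB a0 a1 a2 i := by
    intro n
    induction n with
    | zero => intro i _ _; simp
    | succ m ih =>
      intro i hLi hH
      have h1 : fB a0 a1 a2 (i + m) ≤ fB a0 a1 a2 i := ih i hLi (by push_cast at hH ⊢; omega)
      have h2 : fB a0 a1 a2 (i + m + 1) = fB a0 a1 a2 (i + m) + (a1 + a2 * (i + m)) := fB_succ _ _ _ _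
      have h3 : a1 + a2 * (i + m) ≤ 0 := hs _ (by omega) (by push_cast at hH ⊢; omega)
      have : (i + (m + 1 : Nat)) = (i + m + 1) := by push_cast; ring
      rw [this]; omega
  intro i j hLi hij hjH
  have := key (j - i).toNat i hLi (by omega)
  have hji : i + ((j - i).toNat : Int) = j := by omega
  rwa [hji] at this

lemma firstGe1000_ge (a0 a1 a2 : Int) : ∀ (fuel : Nat) (lo hi : Int),
    lo ≤ firstGe1000 fuel a0 a1 a2 lo hi := by
  intro fuel
  induction fuel with
  | zero => intro lo hi; simp [firstGe1000]
  | succ fu ih =>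
    intro lo hi
    rw [firstGe1000]
    by_cases h : lo < hi
    · rw [if_pos h]
      by_cases hge : 1000 ≤ fB a0 a1 a2 (PySem.Int.floordiv (lo + hi) 2)
      · rw [if_pos hge]; exact ih lo _
      · rw [if_neg hge]
        have hb := PySem.Int.floordiv_two_mid_bounds (lo := lo) (hi := hi) (le_of_lt h)
        have := ih (PySem.Int.floordiv (lo + hi) 2 + 1) hi
        omega
    · rw [if_neg h]

-- every index the binary search skips has term < 1000, provided fB is nondecreasing on [lo, hi]
lemma firstGe1000_skipped (a0 a1 a2 : Int) : ∀ (fuel : Nat) (lo hi : Int),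
    (∀ i j, lo ≤ i → i ≤ j → j ≤ hi → fB a0 a1 a2 i ≤ fB a0 a1 a2 j) →
    ∀ j, lo ≤ j → j < firstGe1000 fuel a0 a1 a2 lo hi → fB a0 a1 a2 j < 1000 := by
  intro fuel
  induction fuel with
  | zero => intro lo hi _ j hloj hj; rw [firstGe1000] at hj; omega
  | succ fu ih =>
    intro lo hi hm j hloj hj
    rw [firstGe1000] at hj
    by_cases h : lo < hi
    · rw [if_pos h] at hj
      have hb := PySem.Int.floordiv_two_mid_bounds (lo := lo) (hi := hi) (le_of_lt h)
      by_cases hge : 1000 ≤ fB a0 a1 a2 (PySem.Int.floordiv (lo + hi) 2)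
      · rw [if_pos hge] at hj
        exact ih lo _ (fun i j' hi' hij' hj' => hm i j' hi' hij' (by omega)) j hloj hj
      · rw [if_neg hge] at hj
        by_cases hjm : j ≤ PySem.Int.floordiv (lo + hi) 2
        · have := hm j (PySem.Int.floordiv (lo + hi) 2) hloj hjm (by omega)
          omega
        · exact ih _ hi (fun i j' hi' hij' hj' => hm i j' (by omega) hij' hj') j (by omega) hj
    · rw [if_neg h] at hj; omega

-- step-sign facts
lemma step_nonneg_pos (a1 a2 i : Int) (h2 : 0 < a2) (hi : -(PySem.Int.floordiv a1 a2) ≤ i) :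
    0 ≤ a1 + a2 * i := by
  have hq := PySem.Int.floordiv_mul_add_mod a1 a2
  have hr := PySem.Int.mod_nonneg (a := a1) (b := a2) h2
  nlinarith [mul_le_mul_of_nonneg_left hi (le_of_lt h2)]

lemma step_nonpos_pos (a1 a2 i : Int) (h2 : 0 < a2) (hi : i < -(PySem.Int.floordiv a1 a2)) :
    a1 + a2 * i ≤ 0 := by
  have hq := PySem.Int.floordiv_mul_add_mod a1 a2
  have hr := PySem.Int.mod_lt (a := a1) (b := a2) h2
  nlinarith [mul_le_mul_of_nonneg_left (show i ≤ -(PySem.Int.floordiv a1 a2) - 1 by omega) (le_of_lt h2)]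

lemma step_nonneg_neg (a1 a2 i : Int) (h2 : a2 < 0) (h0 : 0 ≤ i)
    (hp : i < max 0 (PySem.Int.floordiv (a1 - 1) (-a2) + 1)) : 0 ≤ a1 + a2 * i := by
  have hm : 0 < -a2 := by omega
  have hq := PySem.Int.floordiv_mul_add_mod (a1 - 1) (-a2)
  have hr := PySem.Int.mod_nonneg (a := a1 - 1) (b := -a2) hm
  have hile : i ≤ PySem.Int.floordiv (a1 - 1) (-a2) := by omega
  nlinarith [mul_le_mul_of_nonneg_left hile (le_of_lt hm)]

lemma jumpB_gt (a0 a1 a2 k : Int) : k < jumpB a0 a1 a2 k := by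
  unfold jumpB
  split_ifs with h1 h2 h3 h4
  · calc k < k + 1 := by omega
      _ ≤ max (k + 1) (-(PySem.Int.floordiv a1 a2)) := le_max_left _ _
      _ ≤ _ := firstGe1000_ge _ _ _ _ _ _
  · calc k < k + 1 := by omega
      _ ≤ _ := firstGe1000_ge _ _ _ _ _ _
  · omega
  · calc k < k + 1 := by omega
      _ ≤ _ := firstGe1000_ge _ _ _ _ _ _
  · omega

-- every index a jump skips (including the current one) has term < 1000
lemma jump_correct (a0 a1 a2 k : Int) (h0 : 0 ≤ k) (ht : fB a0 a1 a2 k < 1000) :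
    ∀ j, k ≤ j → j < jumpB a0 a1 a2 k → fB a0 a1 a2 j < 1000 := by
  intro j hkj hj
  rcases eq_or_lt_of_le hkj with rfl | hkj'
  · exact ht
  unfold jumpB at hj
  split_ifs at hj with h1 h2 h3 h4
  · -- a2 > 0
    set kv := -(PySem.Int.floordiv a1 a2) with hkv
    set lo := max (k + 1) kv with hlo
    by_cases hjlo : j < lo
    · -- skipped on the decreasing branch: k+1 ≤ j < lo, so lo = kv and j < kv
      have hjkv : j < kv := by omega
      have := fB_anti a0 a1 a2 k j
        (fun i hki hij => step_nonpos_pos a1 a2 i h1 (by omega)) k j (le_refl _) (by omega) (le_refl _)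
      omega
    · exact firstGe1000_skipped a0 a1 a2 (2 ^ 63) lo _
        (fB_mono a0 a1 a2 lo _
          (fun i hloi _ => step_nonneg_pos a1 a2 i h1 (by omega)))
        j (by omega) hj
  · -- a2 < 0, k < peak
    exact firstGe1000_skipped a0 a1 a2 (2 ^ 63) (k + 1) _
      (fB_mono a0 a1 a2 (k + 1) _
        (fun i hki hip => step_nonneg_neg a1 a2 i h2 (by omega) (by omega)))
      j (by omega) hj
  · -- a2 < 0, k ≥ peak: jump = k + 1, nothing strictly between
    omega
  · -- a2 = 0, a1 > 0
    exact firstGe1000_skipped a0 a1 a2 (2 ^ 63) (k + 1) _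
      (fB_mono a0 a1 a2 (k + 1) _ (fun i _ _ => by nlinarith))
      j (by omega) hj
  · omega

-- A's loop passes through d consecutive sub-1000 indices without changing its accumulator
lemma A_skip (a0 a1 a2 : Int) : ∀ (d : Nat) (fuel : Nat) (k : Int) (nums : List Int),
    (∀ j : Nat, j < d → fB a0 a1 a2 (k + j) < 1000) →
    numsLoopA fuel (fB a0 a1 a2 k) (a1 + a2 * k) a2 nums
      = numsLoopA (fuel - d) (fB a0 a1 a2 (k + d)) (a1 + a2 * (k + d)) a2 nums := by
  intro d
  induction d with
  | zero => intro fuel k nums _; simp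
  | succ e ih =>
    intro fuel k nums hlt
    match fuel with
    | 0 => simp [numsLoopA]
    | f + 1 =>
      have h0 : fB a0 a1 a2 k < 1000 := by
        have := hlt 0 (by omega); simpa using this
      rw [numsLoopA]
      rw [if_pos (by omega), if_neg (by omega)]
      have hstep : fB a0 a1 a2 k + (a1 + a2 * k) = fB a0 a1 a2 (k + 1) := (fB_succ a0 a1 a2 k).symm
      have hstep2 : a1 + a2 * k + a2 = a1 + a2 * (k + 1) := by ring
      rw [hstep, hstep2, ih f (k + 1) nums (fun j hj => by
        have := hlt (j + 1) (by omega)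
        have hc : k + 1 + (j : Int) = k + ((j + 1 : Nat) : Int) := by push_cast; ring
        rwa [hc])]
      have hf : f - e = f + 1 - (e + 1) := by omega
      have hk : k + 1 + (e : Int) = k + ((e + 1 : Nat) : Int) := by push_cast; ring
      rw [hf, hk]

-- lockstep invariant: B at index k ↔ A at state (fB k, a1 + a2*k), fuel counted identically
lemma main_eq (a0 a1 a2 : Int) : ∀ (dep fuel : Nat), fuel ≤ dep → ∀ (k : Int) (nums : List Int), 0 ≤ k →
    numsLoopBGo dep fuel a0 a1 a2 k nums = numsLoopA fuel (fB a0 a1 a2 k) (a1 + a2 * k) a2 nums := by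
  intro dep
  induction dep with
  | zero =>
    intro fuel hf k nums _
    have : fuel = 0 := by omega
    subst this
    simp [numsLoopA, numsLoopBGo]
  | succ dp ih =>
    intro fuel hf k nums hk
    match fuel with
    | 0 => simp [numsLoopA, numsLoopBGo]
    | fu + 1 =>
      rw [numsLoopBGo]
      by_cases hbig : 10000 ≤ fB a0 a1 a2 k
      · rw [if_pos hbig, numsLoopA, if_neg (by omega)]
      · rw [if_neg hbig]
        by_cases hwin : 1000 ≤ fB a0 a1 a2 k
        · rw [if_pos hwin, numsLoopA, if_pos (by omega), if_pos hwin,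
            ih fu (by omega) (k + 1) (nums ++ [fB a0 a1 a2 k]) (by omega)]
          rw [show fB a0 a1 a2 k + (a1 + a2 * k) = fB a0 a1 a2 (k + 1) from (fB_succ a0 a1 a2 k).symm,
            show a1 + a2 * k + a2 = a1 + a2 * (k + 1) by ring]
        · rw [if_neg hwin]
          have hgt : k < jumpB a0 a1 a2 k := jumpB_gt a0 a1 a2 k
          have hd1 : 1 ≤ (jumpB a0 a1 a2 k - k).toNat := by omega
          have hkd : k + ((jumpB a0 a1 a2 k - k).toNat : Int) = jumpB a0 a1 a2 k := by omega
          have hskip := A_skip a0 a1 a2 (jumpB a0 a1 a2 k - k).toNat (fu + 1) k nums (fun j hj =>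
            jump_correct a0 a1 a2 k hk (by omega) (k + j) (by omega) (by omega))
          rw [hskip, hkd, ih (fu + 1 - (jumpB a0 a1 a2 k - k).toNat) (by omega)
            (jumpB a0 a1 a2 k) nums (by omega)]

-- ===== VERDICT (by name: the statement is the Claim_ definition above) =====
theorem nums_1000_to_10000_spec : Claim_equal_nums_1000_to_10000 := by
  intro a0 a1 a2 _
  unfold Spec_nums_1000_to_10000 nums_1000_to_10000 nums_1000_to_10000_alt
  rw [main_eq a0 a1 a2 (2 ^ 63) (2 ^ 63) (le_refl _) 0 [] (le_refl 0)]
  norm_num [fB, PySem.Int.floordiv]
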